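-- pv_equiv track=rewrite | github.com/mgbarsky/botany_citizen | data_prep/replace_values.py | trim_table
-- ===== SOURCE A (Python) =====
-- def trim_table(header, data_rows, unique_val_rows):
--     attribute_list = []
--     for row_index in range(0, len(unique_val_rows), 2):
--         if unique_val_rows[row_index][0] not in attribute_list:
--             attribute_list.append(unique_val_rows[row_index][0])
--     attribute_list += ['Species', 'Genus', 'Family', 'Order']
--
--     trimmed_header = []
--     trimmed_rows = [[] for i in range(len(data_rows))]
--     for attr_index in range(len(header)):
--         if header[attr_index] in attribute_list:
--             trimmed_header.append(header[attr_index])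
--             for data_row_index in range(len(data_rows)):
--                 trimmed_rows[data_row_index].append(data_rows[data_row_index][attr_index])
--     return trimmed_header, trimmed_rows
-- ===== SOURCE B (Python) =====
-- def trim_table(header, data_rows, unique_val_rows):
--     keep = {unique_val_rows[i][0] for i in range(0, len(unique_val_rows), 2)}
--     keep.update(('Species', 'Genus', 'Family', 'Order'))
--     trimmed_header = [h for h in header if h in keep]
--     kept_cols = [col for h, col in zip(header, zip(*data_rows)) if h in keep]
--     if kept_cols:
--         trimmed_rows = [list(r) for r in zip(*kept_cols)]
--     else:
--         trimmed_rows = [[] for _ in data_rows]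
--     return trimmed_header, trimmed_rows
-- ===== Notes on version B (the rewrite author's own statement) =====
-- stated objective: alternative
-- what changed: B is column-oriented: it pairs each header name with its whole column via zip(header, zip(*data_rows)), filters the kept (name, column) pairs in one pass, and transposes the kept columns back into rows with zip(*kept_cols), instead of A's column-major nested index loops that append cell by cell into pre-allocated row lists.
import Mathlib
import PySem

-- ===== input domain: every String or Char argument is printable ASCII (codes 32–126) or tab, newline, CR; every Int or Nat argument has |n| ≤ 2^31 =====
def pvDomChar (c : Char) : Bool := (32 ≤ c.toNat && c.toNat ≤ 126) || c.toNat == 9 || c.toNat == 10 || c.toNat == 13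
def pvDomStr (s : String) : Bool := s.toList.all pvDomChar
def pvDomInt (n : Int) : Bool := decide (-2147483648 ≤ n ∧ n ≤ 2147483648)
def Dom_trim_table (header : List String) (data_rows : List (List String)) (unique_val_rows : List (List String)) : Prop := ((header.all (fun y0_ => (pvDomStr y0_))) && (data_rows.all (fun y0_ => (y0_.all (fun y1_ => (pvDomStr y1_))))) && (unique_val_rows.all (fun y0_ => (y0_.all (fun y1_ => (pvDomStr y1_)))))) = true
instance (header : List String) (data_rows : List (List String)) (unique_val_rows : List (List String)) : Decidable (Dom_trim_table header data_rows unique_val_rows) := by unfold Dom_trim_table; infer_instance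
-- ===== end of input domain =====

-- B works on whole COLUMNS: it pairs each header name with its column (zip(header, zip(*data_rows))),
-- filters the kept pairs once, and transposes the kept columns back into rows, instead of A's
-- column-major nested index loops appending cell by cell; objective: alternative (same return value on Pre_).

-- ===== PORT A =====
-- A: build attribute_list by a dedup loop over the even rows, then a column-major double loop
-- appending into pre-allocated row accumulators (ported as zipWith over the row states and data_rows).
def trim_table (header : List String) (data_rows : List (List String)) (unique_val_rows : List (List String)) : List String × List (List String) :=
  let attribute_list :=
    (PySem.List.pyRange 0 unique_val_rows.length 2).foldl
      (fun acc ri =>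
        let v := ((PySem.List.pyGet? unique_val_rows ri).getD []).headD ""
        if v ∈ acc then acc else acc ++ [v]) []
  let attribute_list := attribute_list ++ ["Species", "Genus", "Family", "Order"]
  (PySem.List.pyRange 0 header.length 1).foldl
    (fun st ai =>
      let h := (PySem.List.pyGet? header ai).getD ""
      if h ∈ attribute_list then
        (st.1 ++ [h],
         List.zipWith (fun tr dr => tr ++ [(PySem.List.pyGet? dr ai).getD ""]) st.2 data_rows)
      else st)
    ([], data_rows.map (fun _ => ([] : List String)))

-- ===== PORT B =====
-- zip(*rows): the list of columns, truncated to the shortest row (exact for Python's n-ary zip of lists).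
def pyZipStar (rows : List (List String)) : List (List String) :=
  let m := ((rows.map List.length).min?).getD 0
  (List.range m).map (fun i => rows.map (fun r => r.getD i ""))

def trim_table_alt (header : List String) (data_rows : List (List String)) (unique_val_rows : List (List String)) : List String × List (List String) :=
  let keep : PySem.Set String :=
    PySem.Set.update
      (PySem.Set.ofList ((PySem.List.pyRange 0 unique_val_rows.length 2).map
        (fun i => ((PySem.List.pyGet? unique_val_rows i).getD []).headD "")))
      ["Species", "Genus", "Family", "Order"]
  let trimmed_header := header.filter (fun h => keep.contains h)
  let kept_cols := ((header.zip (pyZipStar data_rows)).filter (fun p => keep.contains p.1)).map (fun p => p.2)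
  let trimmed_rows := if kept_cols = [] then data_rows.map (fun _ => ([] : List String)) else pyZipStar kept_cols
  (trimmed_header, trimmed_rows)

-- ===== PRECONDITION & SPEC =====
-- the attribute names both programs select on (the head of every even-indexed row plus the taxonomy names)
def pvNames_trim_table (unique_val_rows : List (List String)) : List String :=
  (PySem.List.pyRange 0 unique_val_rows.length 2).map
    (fun i => ((PySem.List.pyGet? unique_val_rows i).getD []).headD "")
  ++ ["Species", "Genus", "Family", "Order"]

-- Pre_ excludes exactly the inputs where Python A raises IndexError: an even-indexed row of
-- unique_val_rows is empty, or some selected column index is out of range for some data row.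
def Pre_trim_table (header : List String) (data_rows : List (List String)) (unique_val_rows : List (List String)) : Prop :=
  (∀ i ∈ PySem.List.pyRange 0 unique_val_rows.length 2, (PySem.List.pyGet? unique_val_rows i).getD [] ≠ []) ∧
  (∀ i ∈ PySem.List.pyRange 0 header.length 1,
    (PySem.List.pyGet? header i).getD "" ∈ pvNames_trim_table unique_val_rows →
    ∀ row ∈ data_rows, PySem.Raise.InRange row.length i)
instance (header : List String) (data_rows : List (List String)) (unique_val_rows : List (List String)) : Decidable (Pre_trim_table header data_rows unique_val_rows) := by unfold Pre_trim_table; infer_instance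

def pvWitness_trim_table : List String × List (List String) × List (List String) :=
  (["Species", "color", "note"], [["a", "b", "c"], ["d", "e", "f"]], [["color"], ["red green"]])

def Spec_trim_table (header : List String) (data_rows : List (List String)) (unique_val_rows : List (List String)) (out : List String × List (List String)) : Prop := out = trim_table_alt header data_rows unique_val_rows
instance (header : List String) (data_rows : List (List String)) (unique_val_rows : List (List String)) (out : List String × List (List String)) : Decidable (Spec_trim_table header data_rows unique_val_rows out) := by unfold Spec_trim_table; infer_instance

-- ===== CLAIM (what is proved, stated in full; the proofs are below) =====
def Claim_equal_trim_table : Prop := ∀ (header : List String) (data_rows : List (List String)) (unique_val_rows : List (List String)), Dom_trim_table header data_rows unique_val_rows → Pre_trim_table header data_rows unique_val_rows → Spec_trim_table header data_rows unique_val_rows (trim_table header data_rows unique_val_rows)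

-- ===== LEMMAS AND PROOFS =====

-- membership in A's dedup accumulator
theorem pv_mem_dedup_foldl (f : Int → String) (l : List Int) (acc : List String) (x : String) :
    x ∈ l.foldl (fun acc ri => let v := f ri; if v ∈ acc then acc else acc ++ [v]) acc ↔
      x ∈ acc ∨ x ∈ l.map f := by
  induction l generalizing acc with
  | nil => simp
  | cons i t ih =>
    simp only [List.foldl_cons, List.map_cons, List.mem_cons, ih]
    by_cases h : f i ∈ acc
    · simp [h]
      constructor
      · rintro (ha | hm); · exact Or.inl ha
        · exact Or.inr (Or.inr hm)
      · rintro (ha | he | hm)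
        · exact Or.inl ha
        · exact Or.inl (he ▸ h)
        · exact Or.inr hm
    · simp [h, List.mem_append, or_assoc]

-- appending one column entry to every row accumulator at once
theorem pv_zip_step (rows : List (List String)) (s : List Int) (i : Int) :
    List.zipWith (fun tr dr => tr ++ [(PySem.List.pyGet? dr i).getD ""])
        (rows.map (fun dr => s.map (fun j => (PySem.List.pyGet? dr j).getD ""))) rows
      = rows.map (fun dr => s.map (fun j => (PySem.List.pyGet? dr j).getD "") ++ [(PySem.List.pyGet? dr i).getD ""]) := by
  induction rows with
  | nil => simp
  | cons r rs ihr => simp [ihr]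

-- the invariant of A's main column-major loop
theorem pv_loopA (header : List String) (data_rows : List (List String)) (AL : List String)
    (l : List Int) (s : List Int) :
    l.foldl
      (fun st ai =>
        let h := (PySem.List.pyGet? header ai).getD ""
        if h ∈ AL then
          (st.1 ++ [h],
           List.zipWith (fun tr dr => tr ++ [(PySem.List.pyGet? dr ai).getD ""]) st.2 data_rows)
        else st)
      (s.map (fun i => (PySem.List.pyGet? header i).getD ""),
       data_rows.map (fun dr => s.map (fun i => (PySem.List.pyGet? dr i).getD "")))
    = (((s ++ l.filter (fun i => decide ((PySem.List.pyGet? header i).getD "" ∈ AL))).map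
          (fun i => (PySem.List.pyGet? header i).getD "")),
       data_rows.map (fun dr =>
         (s ++ l.filter (fun i => decide ((PySem.List.pyGet? header i).getD "" ∈ AL))).map
           (fun i => (PySem.List.pyGet? dr i).getD ""))) := by
  induction l generalizing s with
  | nil => simp
  | cons i t ih =>
    simp only [List.foldl_cons, List.filter_cons]
    by_cases h : (PySem.List.pyGet? header i).getD "" ∈ AL
    · have hz := pv_zip_step data_rows s i
      have := ih (s ++ [i])
      simp only [List.map_append, List.map_cons, List.map_nil] at this hz
      simp only [h, if_true, decide_true, hz, ]
      simpa [List.map_append] using this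
    · simp only [h, if_false, ]
      exact ih s

-- membership in B's keep set equals membership in A's attribute_list
theorem pv_mem_attrs (unique_val_rows : List (List String)) (x : String) :
    x ∈ PySem.Set.update
          (PySem.Set.ofList ((PySem.List.pyRange 0 unique_val_rows.length 2).map
            (fun i => ((PySem.List.pyGet? unique_val_rows i).getD []).headD "")))
          ["Species", "Genus", "Family", "Order"] ↔
      x ∈ ((PySem.List.pyRange 0 unique_val_rows.length 2).foldl
            (fun acc ri =>
              let v := ((PySem.List.pyGet? unique_val_rows ri).getD []).headD ""
              if v ∈ acc then acc else acc ++ [v]) [])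
          ++ ["Species", "Genus", "Family", "Order"] := by
  rw [List.mem_append, pv_mem_dedup_foldl]
  simp [PySem.Set.update, PySem.Set.mem_add, PySem.Set.mem_ofList, or_assoc]

-- the Int index selection is the Nat index selection, cast
theorem pv_sel_natCast (header : List String) (q : String → Bool) :
    (PySem.List.pyRange 0 (header.length : Int) 1).filter
        (fun i => q ((PySem.List.pyGet? header i).getD ""))
      = ((List.range header.length).filter (fun k => q (header.getD k ""))).map
          (fun (k : Nat) => (k : Int)) := by
  rw [PySem.List.pyRange_zero_natCast, List.filter_map]
  refine congrArg _ (List.filter_congr ?_)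
  intro k _
  simp [Function.comp, List.getD_eq_getElem?_getD]

-- the Nat-index selection, read back through any list
theorem pv_map_cast_get (l : List String) (s : List Nat) :
    (s.map (fun (k : Nat) => (k : Int))).map (fun i => (PySem.List.pyGet? l i).getD "")
      = s.map (fun k => l.getD k "") := by
  rw [List.map_map]
  refine List.map_congr_left ?_
  intro k _
  simp [Function.comp, List.getD_eq_getElem?_getD]

-- selecting header values by filtered index list = filtering the header
theorem pv_filter_eq_map_range (l : List String) (q : String → Bool) :
    ((List.range l.length).filter (fun k => q (l.getD k ""))).map (fun k => l.getD k "")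
      = l.filter q := by
  induction l with
  | nil => simp
  | cons a t ih =>
    rw [List.length_cons, List.range_succ_eq_map, List.filter_cons, List.filter_map]
    by_cases h : q a
    · simp only [List.getD_cons_zero, h, if_true, List.map_cons, List.map_map]
      rw [List.filter_cons_of_pos (by simpa using h)]
      exact congrArg _ (by simpa [Function.comp, List.getD_cons_succ] using ih)
    · simp only [List.getD_cons_zero, h, Bool.false_eq_true, if_false, List.map_map]
      rw [List.filter_cons_of_neg (by simpa using h)]
      simpa [Function.comp, List.getD_cons_succ] using ih

-- zipping a list with indexed columns, filtering, and projecting = selecting columns by index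
theorem pv_zip_filter (q : String → Bool) (hdr : List String) :
    ∀ (m : Nat) (colf : Nat → List String),
    (((hdr.zip ((List.range m).map colf)).filter (fun p => q p.1)).map (fun p => p.2))
      = ((List.range (min hdr.length m)).filter (fun k => q (hdr.getD k ""))).map colf := by
  induction hdr with
  | nil => intro m colf; simp
  | cons a t ih =>
    intro m colf
    cases m with
    | zero => simp
    | succ m' =>
      rw [List.range_succ_eq_map, List.map_cons, List.map_map, List.zip_cons_cons,
          List.filter_cons]
      have hmin : min (a :: t).length (m' + 1) = min t.length m' + 1 := by simp
      rw [hmin, List.range_succ_eq_map, List.filter_cons]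
      have hih := ih m' (fun k => colf (k + 1))
      by_cases h : q a
      · simp only [List.getD_cons_zero, h, if_pos, List.map_cons]
        congr 1
        rw [List.filter_map, List.map_map]
        simpa [Function.comp, Nat.succ_eq_add_one, List.getD_cons_succ] using hih
      · simp only [List.getD_cons_zero, h, Bool.false_eq_true, if_neg, not_false_iff]
        rw [List.filter_map, List.map_map]
        simpa [Function.comp, Nat.succ_eq_add_one, List.getD_cons_succ] using hih

-- a filter over range n may be truncated to range k when the predicate forces < k
theorem pv_filter_range_trunc (n k : Nat) (q : Nat → Bool) (hk : k ≤ n)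
    (h : ∀ i, i < n → q i = true → i < k) :
    (List.range n).filter q = (List.range k).filter q := by
  obtain ⟨d, rfl⟩ := Nat.exists_eq_add_of_le hk
  rw [List.range_add, List.filter_append]
  have hnil : ((List.range d).map (fun j => k + j)).filter q = [] := by
    rw [List.filter_eq_nil_iff]
    intro a ha
    simp only [List.mem_map, List.mem_range] at ha
    obtain ⟨j, hj, rfl⟩ := ha
    intro hq
    exact absurd (h _ (by omega) hq) (by omega)
  simp [hnil]

-- min? of a nonempty constant list
theorem pv_min?_const (l : List Nat) (d : Nat) (hne : l ≠ []) (h : ∀ x ∈ l, x = d) :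
    l.min? = some d := by
  cases l with
  | nil => exact absurd rfl hne
  | cons x t =>
    have hx : x = d := h x (List.mem_cons_self)
    rw [List.min?_cons]
    cases ht : t.min? with
    | none => simp [hx]
    | some b =>
      have hb : b = d := h b (List.mem_cons_of_mem _ (List.min?_mem ht))
      simp [hx, hb]

-- transposing a nonempty list of equal-length columns
theorem pv_zipStar_cols (cols : List (List String)) (d : Nat) (hne : cols ≠ [])
    (h : ∀ c ∈ cols, c.length = d) :
    pyZipStar cols = (List.range d).map (fun j => cols.map (fun c => c.getD j "")) := by
  unfold pyZipStar
  have : (cols.map List.length).min? = some d :=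
    pv_min?_const _ d (by simpa using hne) (by simpa using h)
  simp [this]

-- mapping over a list = mapping its indexed reads over range
theorem pv_map_eq_range {α : Type} (l : List (List String)) (g : List String → α) :
    l.map g = (List.range l.length).map (fun j => g (l.getD j [])) := by
  induction l with
  | nil => simp
  | cons a t ih =>
    rw [List.length_cons, List.range_succ_eq_map, List.map_cons, List.map_cons, List.map_map]
    simp only [List.getD_cons_zero]
    exact congrArg _ (by simpa [Function.comp, List.getD_cons_succ] using ih)

-- ===== VERDICT (by name: the statement is the Claim_ definition above) =====
theorem trim_table_spec : Claim_equal_trim_table := by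
  intro header data_rows unique_val_rows _ hpre
  obtain ⟨-, hpre2⟩ := hpre
  unfold Spec_trim_table trim_table trim_table_alt
  dsimp only []
  set AL := (((PySem.List.pyRange 0 unique_val_rows.length 2).foldl
      (fun acc ri =>
        let v := ((PySem.List.pyGet? unique_val_rows ri).getD []).headD ""
        if v ∈ acc then acc else acc ++ [v]) [])
      ++ ["Species", "Genus", "Family", "Order"]) with hAL
  set keep := PySem.Set.update
      (PySem.Set.ofList ((PySem.List.pyRange 0 unique_val_rows.length 2).map
        (fun i => ((PySem.List.pyGet? unique_val_rows i).getD []).headD "")))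
      ["Species", "Genus", "Family", "Order"] with hkeep
  -- the two membership tests agree, and both mean membership in pvNames
  have hqAL : ∀ x : String, (decide (x ∈ AL)) = keep.contains x := by
    intro x
    rw [Bool.eq_iff_iff, PySem.Set.contains_iff, decide_eq_true_eq, hkeep, hAL]
    exact (pv_mem_attrs unique_val_rows x).symm
  have hqNames : ∀ x : String, keep.contains x = true ↔ x ∈ pvNames_trim_table unique_val_rows := by
    intro x
    rw [PySem.Set.contains_iff, hkeep, pv_mem_attrs, pvNames_trim_table]
    rw [List.mem_append, List.mem_append, pv_mem_dedup_foldl]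
    simp
  -- A's loop in closed form
  have hA := pv_loopA header data_rows AL (PySem.List.pyRange 0 header.length 1) []
  simp only [List.map_nil, List.nil_append] at hA
  rw [hA]
  simp only [hqAL]
  -- Nat-index selection
  set q : String → Bool := fun h => keep.contains h with hq
  set selN := (List.range header.length).filter (fun k => q (header.getD k "")) with hselN
  have hsel : (PySem.List.pyRange 0 (header.length : Int) 1).filter
      (fun i => q ((PySem.List.pyGet? header i).getD "")) = selN.map (fun (k : Nat) => (k : Int)) :=
    pv_sel_natCast header q
  rw [hsel]
  -- first component
  have hfst : (selN.map (fun (k : Nat) => (k : Int))).map (fun i => (PySem.List.pyGet? header i).getD "")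
      = header.filter q := by
    rw [pv_map_cast_get, hselN, pv_filter_eq_map_range]
  -- kept_cols in closed form
  have hcols : ((header.zip (pyZipStar data_rows)).filter (fun p => q p.1)).map (fun p => p.2)
      = ((List.range (min header.length (((data_rows.map List.length).min?).getD 0))).filter
          (fun k => q (header.getD k ""))).map
          (fun i => data_rows.map (fun r => r.getD i "")) := by
    rw [show pyZipStar data_rows = (List.range (((data_rows.map List.length).min?).getD 0)).map
          (fun i => data_rows.map (fun r => r.getD i "")) from rfl]
    exact pv_zip_filter q header _ _
  cases hdr : data_rows with
  | nil =>
    subst hdr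
    refine Prod.ext ?_ ?_
    · simpa [List.map_map] using hfst
    · simp [pyZipStar]
  | cons r0 rs =>
    rw [← hdr]
    have hdne : data_rows ≠ [] := by rw [hdr]; simp
    -- the shortest-row length m, and: every selected index is < m
    set m := ((data_rows.map List.length).min?).getD 0 with hm
    have hmlt : ∀ k, k < header.length → q (header.getD k "") = true → k < m := by
      intro k hk hqk
      have hmem : ((k : Int)) ∈ PySem.List.pyRange 0 (header.length : Int) 1 := by
        rw [PySem.List.mem_pyRange_one]; omega
      have hgd : (PySem.List.pyGet? header (k : Int)).getD "" = header.getD k "" := by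
        simp [List.getD_eq_getElem?_getD]
      have hnames : (PySem.List.pyGet? header (k : Int)).getD "" ∈ pvNames_trim_table unique_val_rows := by
        rw [hgd]; exact (hqNames _).mp hqk
      have hall := hpre2 _ hmem hnames
      -- min? of a nonempty list is some length of a member row
      cases hmin : (data_rows.map List.length).min? with
      | none =>
        rw [List.min?_eq_none_iff] at hmin
        exact absurd (List.map_eq_nil_iff.mp hmin) hdne
      | some a =>
        have ha := List.min?_mem hmin
        simp only [List.mem_map] at ha
        obtain ⟨row, hrow, hlen⟩ := ha
        have := hall row hrow
        simp only [PySem.Raise.InRange] at this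
        rw [hm, hmin]
        simp only [Option.getD_some]
        omega
    have hminle : min header.length m ≤ header.length := Nat.min_le_left _ _
    have htrunc' : (List.range (min header.length m)).filter (fun k => q (header.getD k "")) = selN := by
      rw [hselN]
      exact (pv_filter_range_trunc header.length (min header.length m) _ hminle
        (fun i hi hqi => lt_min hi (hmlt i hi hqi))).symm
    rw [hcols, htrunc']
    -- second component
    refine Prod.ext ?_ ?_
    · simpa [List.map_map] using hfst
    · show data_rows.map (fun dr => (selN.map (fun (k : Nat) => (k : Int))).map
          (fun i => (PySem.List.pyGet? dr i).getD "")) =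
        (if selN.map (fun i => data_rows.map (fun r => r.getD i "")) = [] then
          data_rows.map (fun _ => ([] : List String))
        else pyZipStar (selN.map (fun i => data_rows.map (fun r => r.getD i ""))))
      have hrowmap : ∀ dr : List String,
          (selN.map (fun (k : Nat) => (k : Int))).map (fun i => (PySem.List.pyGet? dr i).getD "")
            = selN.map (fun k => dr.getD k "") := fun dr => pv_map_cast_get dr selN
      simp only [hrowmap]
      by_cases hsn : selN = []
      · simp [hsn]
      · rw [if_neg (by simpa using hsn)]
        rw [pv_zipStar_cols _ data_rows.length
          (by simpa using hsn) (by intro c hc; simp only [List.mem_map] at hc;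
                                   obtain ⟨i, -, rfl⟩ := hc; simp)]
        rw [pv_map_eq_range data_rows (fun dr => selN.map (fun k => dr.getD k ""))]
        apply List.map_congr_left
        intro j hj
        rw [List.map_map]
        apply List.map_congr_left
        intro i _
        simp only [List.mem_range] at hj
        simp [Function.comp, List.getD_eq_getElem?_getD, List.getElem?_map]
        cases hje : data_rows[j]? with
        | none => exact absurd (List.getElem?_eq_some_iff.mpr ⟨hj, rfl⟩ ▸ hje) (by simp [List.getElem?_eq_getElem hj] at hje ⊢)
        | some row => simp
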